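-- pv_equiv track=rewrite | github.com/andreamichelon/StillGen-V2 | stillgen/utils.py | transform_slate
-- ===== SOURCE A (Python) =====
-- def transform_slate(slate_value: str) -> str:
--     """Transform slate value according to specific rules.
--
--     Rules:
--     1. Remove the first character (always)
--     2. Remove any P-Z characters
--     3. If digits exist, put them first
--     4. Add hyphen before any trailing letters
--
--     Examples:
--     - "143" → "43"
--     - "143A" → "43-A"
--     - "143AB" → "43-AB"
--     - "1X43" → "43"
--     - "1A43" → "43A"
--     - "1A43B" → "43A-B"
--     - "1XA43B" → "43A-B"
--     """
--     if not slate_value: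
--         return ''
--
--     # Remove any leading/trailing spaces
--     slate_value = slate_value.strip()
--
--     # If empty after stripping, return empty string
--     if not slate_value:
--         return ''
--
--     # Always remove the first character
--     if len(slate_value) > 1:
--         slate_value = slate_value[1:]
--     else:
--         return ''  # If only one character, nothing left after removal
--
--     # Remove any P-Z characters from the string
--     cleaned_slate = ''
--     for char in slate_value:
--         if char.upper() not in 'PQRSTUVWXYZ':
--             cleaned_slate += char
--
--     # If the cleaned slate is empty, return empty string
--     if not cleaned_slate:
--         return ''
--
--     # Find the first digit position
--     first_digit_pos = -1
--     for i, char in enumerate(cleaned_slate):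
--         if char.isdigit():
--             first_digit_pos = i
--             break
--
--     # If no digits found, return as is
--     if first_digit_pos == -1:
--         return cleaned_slate
--
--     # Find where digits end
--     last_digit_pos = first_digit_pos
--     for i in range(first_digit_pos, len(cleaned_slate)):
--         if cleaned_slate[i].isdigit():
--             last_digit_pos = i
--         else:
--             break
--
--     # Extract parts
--     before_digits = cleaned_slate[:first_digit_pos]
--     digits = cleaned_slate[first_digit_pos:last_digit_pos + 1]
--     after_digits = cleaned_slate[last_digit_pos + 1:]
--
--     # Construct result: digits first, then letters before (no hyphen), then letters after (with hyphen)
--     result = digits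
--     if before_digits:
--         result = digits + before_digits
--     if after_digits:
--         result = result + '-' + after_digits
--
--     return result
-- ===== SOURCE B (Python) =====
-- def transform_slate(slate_value: str) -> str:
--     # One pass over the stripped string with a 3-state automaton; never builds
--     # an intermediate "cleaned" string and uses no indices.
--     state = 0  # 0: before the digit run, 1: inside it, 2: after it
--     digits = []
--     before = []
--     rest = []
--     first = True
--     for c in slate_value.strip():
--         if first:
--             first = False  # drop the first character
--             continue
--         if c.upper() in 'PQRSTUVWXYZ':
--             continue
--         if state == 0:
--             if c.isdigit():
--                 digits.append(c)
--                 state = 1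
--             else:
--                 before.append(c)
--         elif state == 1:
--             if c.isdigit():
--                 digits.append(c)
--             else:
--                 rest.append(c)
--                 state = 2
--         else:
--             rest.append(c)
--     out = ''.join(digits) + ''.join(before)
--     return out + '-' + ''.join(rest) if rest else out
-- ===== Notes on version B (the rewrite author's own statement) =====
-- stated objective: alternative
-- what changed: Replaces A's staged passes (build a cleaned string, then two index-scanning loops to find the digit run, then three slices) by a single pass over the stripped string with a 3-state automaton that classifies each character into digits/before/rest on the fly, never materialising the cleaned string or any index.
import Mathlib
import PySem

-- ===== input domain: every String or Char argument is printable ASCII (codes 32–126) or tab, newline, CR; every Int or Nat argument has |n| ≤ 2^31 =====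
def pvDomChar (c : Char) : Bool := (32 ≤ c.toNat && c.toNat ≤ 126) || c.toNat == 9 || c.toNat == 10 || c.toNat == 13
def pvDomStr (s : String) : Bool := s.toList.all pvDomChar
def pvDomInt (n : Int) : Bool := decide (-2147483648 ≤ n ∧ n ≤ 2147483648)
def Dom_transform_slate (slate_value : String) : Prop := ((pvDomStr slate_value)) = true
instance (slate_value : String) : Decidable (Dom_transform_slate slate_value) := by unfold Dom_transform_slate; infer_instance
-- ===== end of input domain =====

-- B replaces A's staged passes (build a cleaned string, two index-scanning loops, three slices)
-- by a single pass with a 3-state automaton classifying characters on the fly; objective: alternative.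

-- ===== PORT A =====
def pvPZ : List Char := "PQRSTUVWXYZ".toList

-- 'for i, char in enumerate(...): if char.isdigit(): first_digit_pos = i; break'
def pvFindFirstDigit : List Char → Int → Int
  | [], _ => -1
  | c :: rest, i => if PySem.Chars.isdigit c then i else pvFindFirstDigit rest (i + 1)

-- 'for i in range(first, len): if cleaned[i].isdigit(): last = i else: break' (walking the suffix)
def pvFindLastDigit : List Char → Int → Int → Int
  | [], _, last => last
  | c :: rest, i, last =>
    if PySem.Chars.isdigit c then pvFindLastDigit rest (i + 1) i else last

def transform_slate (slate_value : String) : String :=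
  let l := slate_value.toList
  if l = [] then "" else
  let sv := PySem.Chars.strip l
  if sv = [] then "" else
  if sv.length > 1 then
    let sv := PySem.List.slice sv (some 1) none
    let cleaned := sv.foldl
      (fun acc c => if !(pvPZ.contains (PySem.Chars.upperChar c)) then acc ++ [c] else acc) []
    if cleaned = [] then "" else
    let first := pvFindFirstDigit cleaned 0
    if first = -1 then String.ofList cleaned else
    let last := pvFindLastDigit (PySem.List.slice cleaned (some first) none) first first
    let before_digits := PySem.List.slice cleaned none (some first)
    let digits := PySem.List.slice cleaned (some first) (some (last + 1))
    let after_digits := PySem.List.slice cleaned (some (last + 1)) none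
    let result := digits
    let result := if before_digits ≠ [] then digits ++ before_digits else result
    let result := if after_digits ≠ [] then result ++ '-' :: after_digits else result
    String.ofList result
  else ""

-- ===== PORT B =====
-- the loop body of Source B: (first, state, digits, before, rest) updated per character
def pvStep (st : Bool × Nat × List Char × List Char × List Char) (c : Char) :
    Bool × Nat × List Char × List Char × List Char :=
  let (first, state, digits, before, rest) := st
  if first then (false, state, digits, before, rest)
  else if pvPZ.contains (PySem.Chars.upperChar c) then (first, state, digits, before, rest)
  else if state = 0 then
    if PySem.Chars.isdigit c then (first, 1, digits ++ [c], before, rest)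
    else (first, 0, digits, before ++ [c], rest)
  else if state = 1 then
    if PySem.Chars.isdigit c then (first, 1, digits ++ [c], before, rest)
    else (first, 2, digits, before, rest ++ [c])
  else (first, state, digits, before, rest ++ [c])

def transform_slate_alt (slate_value : String) : String :=
  let st := (PySem.Chars.strip slate_value.toList).foldl pvStep (true, 0, [], [], [])
  let digits := st.2.2.1
  let before := st.2.2.2.1
  let rest := st.2.2.2.2
  let out := digits ++ before
  if rest ≠ [] then String.ofList (out ++ '-' :: rest) else String.ofList out

-- ===== PRECONDITION & SPEC =====
def Spec_transform_slate (slate_value : String) (out : String) : Prop := out = transform_slate_alt slate_value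
instance (slate_value : String) (out : String) : Decidable (Spec_transform_slate slate_value out) := by unfold Spec_transform_slate; infer_instance

-- ===== CLAIM (what is proved, stated in full; the proofs are below) =====
def Claim_equal_transform_slate : Prop := ∀ (slate_value : String), Dom_transform_slate slate_value → Spec_transform_slate slate_value (transform_slate slate_value)

-- ===== LEMMAS AND PROOFS =====

-- common canonical form: cleaned split by takeWhile/dropWhile, compared against by both ports
def pvCanon (slate_value : String) : String :=
  let cleaned := (PySem.List.slice (PySem.Chars.strip slate_value.toList) (some 1) none).filter
    (fun c => !(pvPZ.contains (PySem.Chars.upperChar c)))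
  let before := cleaned.takeWhile (fun c => !PySem.Chars.isdigit c)
  let t := cleaned.dropWhile (fun c => !PySem.Chars.isdigit c)
  let digits := t.takeWhile PySem.Chars.isdigit
  let rest := t.dropWhile PySem.Chars.isdigit
  let result := digits ++ before
  if rest ≠ [] then String.ofList (result ++ '-' :: rest) else String.ofList result

lemma pvFindFirstDigit_eq (cl : List Char) (i : Int) :
    pvFindFirstDigit cl i =
      if cl.takeWhile (fun c => !PySem.Chars.isdigit c) = cl then -1
      else i + ((cl.takeWhile (fun c => !PySem.Chars.isdigit c)).length : Int) := by
  induction cl generalizing i with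
  | nil => simp [pvFindFirstDigit]
  | cons c rest ih =>
    by_cases hd : PySem.Chars.isdigit c
    · simp [pvFindFirstDigit, hd]
    · simp only [pvFindFirstDigit, hd, ih, List.takeWhile_cons, Bool.not_false, if_true]
      by_cases he : rest.takeWhile (fun c => !PySem.Chars.isdigit c) = rest
      · simp [he]
      · have : ¬ (c :: rest.takeWhile (fun c => !PySem.Chars.isdigit c) = c :: rest) := by
          simpa using he
        simp only [he, if_false, this, List.length_cons]
        push_cast; ring

lemma pvFindLastDigit_eq (t : List Char) (i last : Int) :
    pvFindLastDigit t i last =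
      if t.takeWhile PySem.Chars.isdigit = [] then last
      else i + ((t.takeWhile PySem.Chars.isdigit).length : Int) - 1 := by
  induction t generalizing i last with
  | nil => simp [pvFindLastDigit]
  | cons c rest ih =>
    by_cases hd : PySem.Chars.isdigit c
    · simp only [pvFindLastDigit, hd, if_true, ih, List.takeWhile_cons, List.length_cons]
      by_cases he : rest.takeWhile PySem.Chars.isdigit = []
      · simp [he]
      · simp only [he, if_false]
        simp only [hd] at *
        push_cast; ring_nf
    · simp [pvFindLastDigit, hd]

lemma pv_take_takeWhile (p : Char → Bool) (l : List Char) :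
    l.take (l.takeWhile p).length = l.takeWhile p := by
  have h := List.take_left (l₁ := l.takeWhile p) (l₂ := l.dropWhile p)
  rwa [List.takeWhile_append_dropWhile] at h

lemma pv_drop_takeWhile (p : Char → Bool) (l : List Char) :
    l.drop (l.takeWhile p).length = l.dropWhile p := by
  have h := List.drop_left (l₁ := l.takeWhile p) (l₂ := l.dropWhile p)
  rwa [List.takeWhile_append_dropWhile] at h

lemma a_eq_canon (s : String) : transform_slate s = pvCanon s := by
  unfold transform_slate pvCanon
  generalize s.toList = l
  by_cases h0 : l = []
  · subst h0; decide
  · simp only [h0, if_false]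
    generalize PySem.Chars.strip l = sv
    by_cases h1 : sv = []
    · subst h1; decide
    · simp only [h1, if_false]
      by_cases h2 : sv.length > 1
      · simp only [h2, if_true, PySem.List.slice_from_one,
          PySem.List.foldl_append_if_eq_filter, List.nil_append]
        generalize (sv.tail.filter fun c => !(pvPZ.contains (PySem.Chars.upperChar c))) = cl
        rw [pvFindFirstDigit_eq]
        by_cases hA : cl.takeWhile (fun c => !PySem.Chars.isdigit c) = cl
        · have ht : cl.dropWhile (fun c => !PySem.Chars.isdigit c) = [] := by
            rw [List.dropWhile_eq_nil_iff]
            exact List.takeWhile_eq_self_iff.mp hA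
          by_cases hcl : cl = []
          · subst hcl; decide
          · simp [hcl, hA, ht]
        · set tw := cl.takeWhile (fun c => !PySem.Chars.isdigit c) with htw
          set dw := cl.dropWhile (fun c => !PySem.Chars.isdigit c) with hdw
          have happ : tw ++ dw = cl := List.takeWhile_append_dropWhile
          have hcl : cl ≠ [] := by
            intro h; exact hA (by simp [h, htw])
          have hnm1 : ¬((0 : Int) + (tw.length : Int) = -1) := by omega
          have hdwne : dw ≠ [] := by
            intro h; exact hA (by rw [← happ, h, List.append_nil])
          have hdig : PySem.Chars.isdigit (dw.head hdwne) = true := by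
            have := List.head_dropWhile_not (fun c => !PySem.Chars.isdigit c) (l := cl)
              (by rw [← hdw]; exact hdwne)
            simpa [← hdw] using this
          clear_value tw dw
          have hdne : dw.takeWhile PySem.Chars.isdigit ≠ [] := by
            obtain ⟨c, t, hct⟩ := List.exists_cons_of_ne_nil hdwne
            subst hct
            simp only [List.head_cons] at hdig
            simp [hdig]
          have hdrop : PySem.List.slice cl (some ((0:Int) + (tw.length : Int))) none = dw := by
            rw [zero_add, PySem.List.slice_from_natCast]
            conv_lhs => rw [← happ]
            exact List.drop_left
          simp only [hA, if_false, hcl, if_false, hnm1, hdrop]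
          rw [pvFindLastDigit_eq, if_neg hdne]
          set dlen := (dw.takeWhile PySem.Chars.isdigit).length with hdlen
          have hlast : (0:Int) + (tw.length:Int) + (dlen:Int) - 1 + 1
              = (tw.length:Int) + (dlen:Int) := by ring
          rw [hlast]
          have hbefore : PySem.List.slice cl none (some ((0:Int) + (tw.length : Int))) = tw := by
            rw [zero_add, PySem.List.slice_to_natCast]
            conv_lhs => rw [← happ]
            exact List.take_left
          have hdigits : PySem.List.slice cl (some ((0:Int) + (tw.length : Int)))
              (some ((tw.length:Int) + (dlen:Int))) = dw.takeWhile PySem.Chars.isdigit := by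
            rw [zero_add, PySem.List.slice_natCast_add]
            conv_lhs => rw [← happ]
            rw [List.drop_left, hdlen]
            exact pv_take_takeWhile _ _
          have hafter : PySem.List.slice cl (some ((tw.length:Int) + (dlen:Int))) none
              = dw.dropWhile PySem.Chars.isdigit := by
            have hcast : (tw.length:Int) + (dlen:Int) = (((tw.length + dlen : Nat)):Int) := by
              push_cast; ring
            rw [hcast, PySem.List.slice_from_natCast, ← List.drop_drop]
            conv_lhs => rw [← happ]
            rw [List.drop_left, hdlen]
            exact pv_drop_takeWhile _ _
          rw [hbefore, hdigits, hafter]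
          by_cases htw0 : tw = [] <;>
            simp only [htw0, List.append_nil, ne_eq, not_true_eq_false, if_false,
              not_false_eq_true, if_true] <;>
          split_ifs <;> simp
      · have h2' : sv.tail = [] := by
          cases sv with
          | nil => rfl
          | cons a t =>
            cases t with
            | nil => rfl
            | cons b t2 => simp at h2
        simp [h2, PySem.List.slice_from_one, h2']

-- PZ characters are no-ops once first=false, so the fold sees only the filtered list
lemma pv_fold_filter (t : List Char) (q : Nat × List Char × List Char × List Char) :
    t.foldl pvStep (false, q)
      = (t.filter (fun c => !(pvPZ.contains (PySem.Chars.upperChar c)))).foldl pvStep (false, q) := by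
  induction t generalizing q with
  | nil => rfl
  | cons c t ih =>
    by_cases h : pvPZ.contains (PySem.Chars.upperChar c)
    · obtain ⟨st, d, b, r⟩ := q
      have hc' : PySem.Chars.upperChar c ∈ pvPZ := by simpa using h
      have hstep : pvStep (false, st, d, b, r) c = (false, st, d, b, r) := by
        simp [pvStep, hc']
      rw [List.filter_cons_of_neg (by simpa using hc'), List.foldl_cons, hstep]
      exact ih _
    · have hc' : PySem.Chars.upperChar c ∉ pvPZ := by simpa using h
      rw [List.filter_cons_of_pos (by simpa using hc'), List.foldl_cons, List.foldl_cons]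
      obtain ⟨st, d, b, r⟩ := q
      have hfst : (pvStep (false, st, d, b, r) c).1 = false := by
        simp only [pvStep]
        split_ifs <;> rfl
      have hres : pvStep (false, st, d, b, r) c = (false, (pvStep (false, st, d, b, r) c).2) :=
        Prod.ext_iff.mpr ⟨hfst, rfl⟩
      rw [hres]
      exact ih _

lemma pv_fold_state2 (cl : List Char)
    (hcl : ∀ c ∈ cl, ¬ pvPZ.contains (PySem.Chars.upperChar c))
    (d b r : List Char) :
    cl.foldl pvStep (false, 2, d, b, r) = (false, 2, d, b, r ++ cl) := by
  induction cl generalizing r with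
  | nil => simp
  | cons c t ih =>
    have hc : PySem.Chars.upperChar c ∉ pvPZ := by simpa using hcl c (by simp)
    have hstep : pvStep (false, 2, d, b, r) c = (false, 2, d, b, r ++ [c]) := by
      simp [pvStep, hc]
    simp only [List.foldl_cons, hstep]
    rw [ih (fun x hx => hcl x (by simp [hx]))]
    simp

lemma pv_fold_state1 (cl : List Char)
    (hcl : ∀ c ∈ cl, ¬ pvPZ.contains (PySem.Chars.upperChar c))
    (d b r : List Char) :
    cl.foldl pvStep (false, 1, d, b, r)
      = (false, (if cl.dropWhile PySem.Chars.isdigit = [] then 1 else 2),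
          d ++ cl.takeWhile PySem.Chars.isdigit, b, r ++ cl.dropWhile PySem.Chars.isdigit) := by
  induction cl generalizing d with
  | nil => simp
  | cons c t ih =>
    have hc : PySem.Chars.upperChar c ∉ pvPZ := by simpa using hcl c (by simp)
    by_cases hd : PySem.Chars.isdigit c
    · have hstep : pvStep (false, 1, d, b, r) c = (false, 1, d ++ [c], b, r) := by
        simp [pvStep, hc, hd]
      simp only [List.foldl_cons, hstep]
      rw [ih (fun x hx => hcl x (by simp [hx]))]
      simp [List.takeWhile_cons, List.dropWhile_cons, hd]
    · have hstep : pvStep (false, 1, d, b, r) c = (false, 2, d, b, r ++ [c]) := by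
        simp [pvStep, hc, hd]
      simp only [List.foldl_cons, hstep]
      rw [pv_fold_state2 t (fun x hx => hcl x (by simp [hx]))]
      simp [List.takeWhile_cons, List.dropWhile_cons, hd]

lemma pv_fold_state0 (cl : List Char)
    (hcl : ∀ c ∈ cl, ¬ pvPZ.contains (PySem.Chars.upperChar c))
    (d b r : List Char) :
    cl.foldl pvStep (false, 0, d, b, r)
      = (false,
          (if cl.dropWhile (fun c => !PySem.Chars.isdigit c) = [] then 0
           else if (cl.dropWhile (fun c => !PySem.Chars.isdigit c)).dropWhile PySem.Chars.isdigit = []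
             then 1 else 2),
          d ++ (cl.dropWhile (fun c => !PySem.Chars.isdigit c)).takeWhile PySem.Chars.isdigit,
          b ++ cl.takeWhile (fun c => !PySem.Chars.isdigit c),
          r ++ (cl.dropWhile (fun c => !PySem.Chars.isdigit c)).dropWhile PySem.Chars.isdigit) := by
  induction cl generalizing b with
  | nil => simp
  | cons c t ih =>
    have hc : PySem.Chars.upperChar c ∉ pvPZ := by simpa using hcl c (by simp)
    by_cases hd : PySem.Chars.isdigit c
    · have hstep : pvStep (false, 0, d, b, r) c = (false, 1, d ++ [c], b, r) := by
        simp [pvStep, hc, hd]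
      simp only [List.foldl_cons, hstep]
      rw [pv_fold_state1 t (fun x hx => hcl x (by simp [hx]))]
      simp [List.takeWhile_cons, List.dropWhile_cons, hd]
    · have hstep : pvStep (false, 0, d, b, r) c = (false, 0, d, b ++ [c], r) := by
        simp [pvStep, hc, hd]
      simp only [List.foldl_cons, hstep]
      rw [ih (fun x hx => hcl x (by simp [hx]))]
      simp [List.takeWhile_cons, List.dropWhile_cons, hd]

lemma b_eq_canon (s : String) : transform_slate_alt s = pvCanon s := by
  unfold transform_slate_alt pvCanon
  generalize PySem.Chars.strip s.toList = sv
  cases sv with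
  | nil => simp [PySem.List.slice_from_one]
  | cons c t =>
    have hstep1 : pvStep (true, 0, [], [], []) c = (false, 0, [], [], []) := by
      simp [pvStep]
    simp only [List.foldl_cons, hstep1, PySem.List.slice_from_one, List.tail_cons]
    rw [pv_fold_filter]
    rw [pv_fold_state0 _ (fun x hx => by
      have := List.of_mem_filter hx
      simpa using this)]
    simp

theorem transform_slate_spec : Claim_equal_transform_slate := by
  intro s _
  unfold Spec_transform_slate
  rw [a_eq_canon, b_eq_canon]
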